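-- pv_equiv track=rewrite | github.com/minhdang241/end-to-end-text-recognizer | ML/text_recognizer/data/iam_line2.py | truncate_label
-- ===== SOURCE A (Python) =====
-- def truncate_label(text:str, max_length:int=None):
--     # ctc_loss can't compute loss if it cannot find a mapping between text label and input
--     # labels. Repeat letters cost double because of the blank symbol needing to be inserted.
--     # If a too-long label is provided, ctc_loss returns an infinite gradient
--     if max_length is None:
--         return text
--
--     cost = 0
--     for i in range(len(text)):
--         if i != 0 and text[i] == text[i - 1]:
--             cost += 2
--         else:
--             cost += 1
--         if cost > max_length:
--             return text[:i]
--     return text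
-- ===== SOURCE B (Python) =====
-- def truncate_label(text: str, max_length: int = None):
--     if max_length is None:
--         return text
--     # reps[k] = number of repeated adjacent pairs inside text[:k]
--     reps = [0]
--     for k in range(1, len(text) + 1):
--         reps.append(reps[-1] + (1 if k >= 2 and text[k - 1] == text[k - 2] else 0))
--     # CTC cost of the k-char prefix is k + reps[k], strictly increasing in k:
--     # binary-search the largest k whose cost still fits within max_length
--     lo, hi = 0, len(text)
--     while lo < hi:
--         mid = (lo + hi + 1) // 2
--         if mid + reps[mid] <= max_length:
--             lo = mid
--         else:
--             hi = mid - 1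
--     return text[:lo]
-- ===== Notes on version B (the rewrite author's own statement) =====
-- stated objective: alternative
-- what changed: Replaces A's linear early-exit scan carrying a running cost with a precomputed prefix table of repeated-pair counts plus a binary search over prefix length, exploiting that the CTC cost of a prefix is strictly increasing.
import Mathlib
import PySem

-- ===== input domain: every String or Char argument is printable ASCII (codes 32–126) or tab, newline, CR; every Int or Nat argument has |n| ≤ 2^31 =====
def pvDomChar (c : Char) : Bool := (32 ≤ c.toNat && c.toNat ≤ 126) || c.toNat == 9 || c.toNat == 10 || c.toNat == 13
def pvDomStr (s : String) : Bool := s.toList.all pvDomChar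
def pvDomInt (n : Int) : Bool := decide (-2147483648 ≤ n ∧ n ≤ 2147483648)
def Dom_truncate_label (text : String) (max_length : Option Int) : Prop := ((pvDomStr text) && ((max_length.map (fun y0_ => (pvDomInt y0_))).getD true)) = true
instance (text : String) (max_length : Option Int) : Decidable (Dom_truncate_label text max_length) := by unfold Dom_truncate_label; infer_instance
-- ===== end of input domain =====

-- B replaces A's linear early-exit cost scan by a prefix table of repeated-pair counts
-- plus a binary search over prefix length (the CTC cost of a prefix is strictly
-- increasing); return values are proved equal on all inputs.

-- ===== PORT A =====
-- A's for-loop over i in range(len(text)), carrying the running cost; text[i] / text[i-1]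
-- are in range whenever read (i < len, and i-1 read only under i ≠ 0), so the Option
-- comparison cs[i]? == cs[i-1]? is exact; text[:i] with 0 ≤ i < len is cs.take i.
def truncateGoA (cs : List Char) (m : Int) (cost : Int) (i : Nat) : String :=
  if i < cs.length then
    let cost' := if i ≠ 0 ∧ cs[i]? == cs[i-1]? then cost + 2 else cost + 1
    if cost' > m then String.ofList (cs.take i)
    else truncateGoA cs m cost' (i+1)
  else String.ofList cs
termination_by cs.length - i

def truncate_label (text : String) (max_length : Option Int) : String :=
  match max_length with
  | none => text
  | some m => truncateGoA text.toList m 0 0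

-- ===== PORT B =====
-- reps = [0]; for k in range(1, len(text)+1): reps.append(reps[-1] + (1 if k >= 2 and
-- text[k-1] == text[k-2] else 0)); indices k-1, k-2 are nonnegative and in range when
-- read, so pyGet? Option equality is exact; reps[-1] on the nonempty list is getLast!.
def buildReps (cs : List Char) : List Int :=
  (PySem.List.pyRange 1 ((cs.length : Int) + 1)).foldl
    (fun r k =>
      r ++ [r.getLast! +
        (if 2 ≤ k ∧ PySem.List.pyGet? cs (k - 1) == PySem.List.pyGet? cs (k - 2)
         then 1 else 0)])
    [0]

-- while lo < hi: mid = (lo+hi+1)//2; if mid + reps[mid] <= max_length: lo = mid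
-- else: hi = mid - 1   (lo, hi stay nonnegative ints, so Nat with (lo+hi+1)/2 = Python //)
def bsearchB (reps : List Int) (m : Int) (lo hi : Nat) : Nat :=
  if lo < hi then
    let mid := (lo + hi + 1) / 2
    if (mid : Int) + PySem.List.pyGetD reps (mid : Int) 0 ≤ m then bsearchB reps m mid hi
    else bsearchB reps m lo (mid - 1)
  else lo
termination_by hi - lo
decreasing_by all_goals omega

def truncate_label_alt (text : String) (max_length : Option Int) : String :=
  match max_length with
  | none => text
  | some m =>
    let cs := text.toList
    let reps := buildReps cs
    let lo := bsearchB reps m 0 cs.length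
    String.ofList (cs.take lo)   -- text[:lo], 0 ≤ lo

-- ===== PRECONDITION & SPEC =====
def Spec_truncate_label (text : String) (max_length : Option Int) (out : String) : Prop := out = truncate_label_alt text max_length
instance (text : String) (max_length : Option Int) (out : String) : Decidable (Spec_truncate_label text max_length out) := by unfold Spec_truncate_label; infer_instance

-- ===== CLAIM (what is proved, stated in full; the proofs are below) =====
def Claim_equal_truncate_label : Prop := ∀ (text : String) (max_length : Option Int), Dom_truncate_label text max_length → Spec_truncate_label text max_length (truncate_label text max_length)

-- ===== LEMMAS AND PROOFS =====

-- pair count of l scanned with previous character prev (boundary pair included)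
def pcP : Option Char → List Char → Int
  | _, [] => 0
  | prev, c :: t => (if prev == some c then 1 else 0) + pcP (some c) t

-- the CTC cost of the k-char prefix of cs fits within m
def pvGood (cs : List Char) (m : Int) (k : Nat) : Prop :=
  (k : Int) + pcP none (cs.take k) ≤ m

-- the table B builds, in closed form
def pvTable (cs : List Char) : List Int :=
  (List.range (cs.length + 1)).map (fun k => pcP none (cs.take k))

-- reference form of A's loop: relative index of the first position whose running total
-- exceeds m, scanning l with previous character prev and accumulated cost
def firstOver (m : Int) (cost : Int) (prev : Option Char) : List Char → Option Nat
  | [] => none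
  | c :: t =>
    let cost' := cost + (if prev == some c then 2 else 1)
    if cost' > m then some 0 else (firstOver m cost' (some c) t).map (· + 1)

-- A's loop equals firstOver (done = processed prefix, i = done.length)
theorem goA_eq (m : Int) (rest done : List Char) (cost : Int) :
    truncateGoA (done ++ rest) m cost done.length
      = match firstOver m cost done.getLast? rest with
        | none => String.ofList (done ++ rest)
        | some j => String.ofList ((done ++ rest).take (done.length + j)) := by
  induction rest generalizing done cost with
  | nil => simp [truncateGoA, firstOver]
  | cons c t ih =>
    rw [truncateGoA]
    have hlt : done.length < (done ++ c :: t).length := by simp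
    have hci : (done ++ c :: t)[done.length]? = some c := by simp
    have hcond : (done.length ≠ 0 ∧ (done ++ c :: t)[done.length]? == (done ++ c :: t)[done.length - 1]?)
        ↔ (done.getLast? == some c) = true := by
      cases done with
      | nil => simp
      | cons d ds =>
        have h1 : ((d :: ds) ++ c :: t)[(d :: ds).length - 1]? = (d :: ds).getLast? := by
          rw [List.getElem?_append_left (by simp)]
          rw [List.getLast?_eq_getElem?]
        constructor
        · rintro ⟨-, h⟩
          rw [hci, h1] at h
          cases hg : (d :: ds).getLast? with
          | none => simp [hg] at h
          | some x =>
            simp [hg] at h ⊢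
            exact h.symm
        · intro h
          refine ⟨by simp, ?_⟩
          rw [hci, h1]
          cases hg : (d :: ds).getLast? with
          | none => simp [hg] at h
          | some x =>
            simp [hg] at h ⊢
            exact h.symm
    have hcost : (if done.length ≠ 0 ∧ (done ++ c :: t)[done.length]? == (done ++ c :: t)[done.length - 1]?
                  then cost + 2 else cost + 1)
        = cost + (if done.getLast? == some c then 2 else 1) := by
      by_cases h : (done.getLast? == some c) = true
      · rw [if_pos (hcond.mpr h), if_pos h]
      · rw [if_neg (fun hh => h (hcond.mp hh)), if_neg h]
    simp only [hlt, if_pos, hcost, firstOver]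
    by_cases hover : cost + (if done.getLast? == some c then 2 else 1) > m
    · simp only [if_pos hover]
      simp [List.take_append_of_le_length (le_refl done.length)]
    · simp only [if_neg hover]
      have hrw : done ++ c :: t = (done ++ [c]) ++ t := by simp
      have hlen : done.length + 1 = (done ++ [c]).length := by simp
      rw [hrw, hlen, ih (done ++ [c])]
      have hlast : (done ++ [c]).getLast? = some c := by simp
      rw [hlast]
      cases firstOver m (cost + (if done.getLast? == some c then 2 else 1)) (some c) t with
      | none => simp
      | some j =>
        simp only [Option.map_some]
        have : (done ++ [c]).length + j = done.length + (j + 1) := by simp; omega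
        rw [this]

theorem pcP_nonneg (prev : Option Char) (l : List Char) : 0 ≤ pcP prev l := by
  induction l generalizing prev with
  | nil => simp [pcP]
  | cons c t ih => simp only [pcP]; have := ih (some c); split <;> omega

theorem pcP_take_mono (l : List Char) (prev : Option Char) (j k : Nat) (h : j ≤ k) :
    pcP prev (l.take j) ≤ pcP prev (l.take k) := by
  induction l generalizing prev j k with
  | nil => simp
  | cons a t ih =>
    cases j with
    | zero => simpa [pcP] using pcP_nonneg prev ((a :: t).take k)
    | succ j' =>
      cases k with
      | zero => omega
      | succ k' =>
        simp only [List.take_succ_cons, pcP]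
        have := ih (some a) j' k' (by omega)
        omega

theorem pvGood_mono (cs : List Char) (m : Int) (j k : Nat) (hjk : j ≤ k)
    (hk : pvGood cs m k) : pvGood cs m j := by
  unfold pvGood at *
  have := pcP_take_mono cs none j k hjk
  omega

-- cost increment from prefix j to prefix j+1
theorem pcP_take_succ (l : List Char) (prev : Option Char) (j : Nat) (hj : j < l.length) :
    pcP prev (l.take (j + 1))
      = pcP prev (l.take j)
        + (if (if j = 0 then prev else l[j-1]?) == l[j]? then 1 else 0) := by
  induction l generalizing prev j with
  | nil => simp at hj
  | cons a t ih =>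
    cases j with
    | zero => simp [pcP]
    | succ j' =>
      simp only [List.take_succ_cons, pcP]
      rw [ih (some a) j' (by simpa using hj)]
      cases j' with
      | zero => simp; ring
      | succ i => simp; ring

-- the table B's first loop builds is pvTable
theorem buildReps_eq (cs : List Char) : buildReps cs = pvTable cs := by
  unfold buildReps pvTable
  rw [PySem.List.pyRange_one]
  have hb : ((cs.length : Int) + 1 - 1).toNat = cs.length := by omega
  rw [hb]
  suffices h : ∀ j, j ≤ cs.length →
      (((List.range j).map (fun k : Nat => (1:Int) + (k:Int))).foldl
        (fun r k =>
          r ++ [r.getLast! +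
            (if 2 ≤ k ∧ PySem.List.pyGet? cs (k - 1) == PySem.List.pyGet? cs (k - 2)
             then 1 else 0)])
        [0])
      = (List.range (j + 1)).map (fun k => pcP none (cs.take k)) by
    exact h cs.length (le_refl _)
  intro j hj
  induction j with
  | zero => simp [pcP]
  | succ j' ih =>
    have hjlen : j' < cs.length := by omega
    have hstep : (List.range (j' + 1 + 1)).map (fun k => pcP none (cs.take k))
        = (List.range (j' + 1)).map (fun k => pcP none (cs.take k))
          ++ [pcP none (cs.take (j' + 1))] := by
      rw [List.range_succ, List.map_append]
      simp
    have hlast : ((List.range (j' + 1)).map (fun k => pcP none (cs.take k))).getLast!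
        = pcP none (cs.take j') := by
      rw [List.range_succ, List.map_append]
      simp [List.getLast!_eq_getLast?_getD]
    rw [List.range_succ, List.map_append, List.foldl_append, ih (by omega), hstep]
    simp only [List.map_cons, List.map_nil, List.foldl_cons, List.foldl_nil]
    congr 1
    rw [hlast, pcP_take_succ cs none j' hjlen]
    congr 1
    -- the two increment conditions coincide
    cases j' with
    | zero =>
      rw [List.getElem?_eq_getElem hjlen]
      rw [if_neg (by rintro ⟨h2, -⟩; push_cast at h2)]
      simp
    | succ i =>
      have h3 : (1:Int) + ((i + 1 : Nat) : Int) - 1 = ((i + 1 : Nat) : Int) := by push_cast; ring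
      have h4 : (1:Int) + ((i + 1 : Nat) : Int) - 2 = ((i : Nat) : Int) := by push_cast; ring
      rw [h3, h4, PySem.List.pyGet?_natCast, PySem.List.pyGet?_natCast]
      simp [Bool.beq_comm]
      simp [show (2:Int) ≤ 1 + ((i:Int) + 1) from by omega]

-- firstOver characterises the first over-limit prefix
theorem FO_spec (m : Int) (l : List Char) : ∀ (c : Int) (prev : Option Char), c ≤ m →
    match firstOver m c prev l with
    | none => c + (l.length : Int) + pcP prev l ≤ m
    | some j => j < l.length ∧ c + (j : Int) + pcP prev (l.take j) ≤ m
        ∧ m < c + ((j : Int) + 1) + pcP prev (l.take (j + 1)) := by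
  induction l with
  | nil => intro c prev hc; simpa [firstOver, pcP] using hc
  | cons a t ih =>
    intro c prev hc
    simp only [firstOver]
    by_cases hover : c + (if prev == some a then 2 else 1) > m
    · simp only [if_pos hover]
      refine ⟨by simp, by simpa [pcP] using hc, ?_⟩
      simp only [List.take_succ_cons, List.take_zero, pcP]
      by_cases hpa : (prev == some a) = true <;> simp only [hpa] at hover ⊢ <;> simp at hover ⊢ <;> omega
    · simp only [if_neg hover]
      have := ih (c + (if prev == some a then 2 else 1)) (some a) (by omega)
      cases hfo : firstOver m (c + (if prev == some a then 2 else 1)) (some a) t with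
      | none =>
        rw [hfo] at this
        simp only [Option.map_none]
        simp only [List.length_cons, pcP]
        by_cases hpa : (prev == some a) = true <;>
          simp only [hpa] at this ⊢ <;> simp at this ⊢ <;> omega
      | some j =>
        rw [hfo] at this
        simp only [Option.map_some]
        obtain ⟨hjl, hle, hgt⟩ := this
        refine ⟨by simpa using hjl, ?_, ?_⟩
        · simp only [List.take_succ_cons, pcP]
          by_cases hpa : (prev == some a) = true <;>
            simp only [hpa] at hle ⊢ <;> simp at hle ⊢ <;> omega
        · simp only [List.take_succ_cons, pcP]
          by_cases hpa : (prev == some a) = true <;>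
            simp only [hpa] at hgt ⊢ <;> simp at hgt ⊢ <;> omega

-- binary-search correctness, by strong induction on hi - lo
theorem bsearch_spec (cs : List Char) (m : Int) :
    ∀ d lo hi, hi - lo = d → lo ≤ hi → hi ≤ cs.length →
    (pvGood cs m lo ∨ lo = 0) →
    (∀ k, hi < k → k ≤ cs.length → ¬ pvGood cs m k) →
    (pvGood cs m (bsearchB (pvTable cs) m lo hi) ∨ bsearchB (pvTable cs) m lo hi = 0) ∧
    (∀ k, bsearchB (pvTable cs) m lo hi < k → k ≤ cs.length → ¬ pvGood cs m k) ∧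
    bsearchB (pvTable cs) m lo hi ≤ hi := by
  intro d
  induction d using Nat.strong_induction_on with
  | _ d ihd =>
    intro lo hi hd hlohi hhin hgoodlo hinv
    rw [bsearchB]
    by_cases hlt : lo < hi
    · simp only [if_pos hlt]
      have hmid1 : lo + 1 ≤ (lo + hi + 1) / 2 := by omega
      have hmid2 : (lo + hi + 1) / 2 ≤ hi := by omega
      have hmn : (lo + hi + 1) / 2 ≤ cs.length := le_trans hmid2 hhin
      have hlook : PySem.List.pyGetD (pvTable cs) (((lo + hi + 1) / 2 : Nat) : Int) 0
          = pcP none (cs.take ((lo + hi + 1) / 2)) := by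
        rw [PySem.List.pyGetD_natCast]
        exact PySem.List.getD_map_range _ _ _ _ (by omega)
      rw [hlook]
      by_cases hcond : (((lo + hi + 1) / 2 : Nat) : Int) + pcP none (cs.take ((lo + hi + 1) / 2)) ≤ m
      · simp only [if_pos hcond]
        have := ihd (hi - (lo + hi + 1) / 2) (by omega) ((lo + hi + 1) / 2) hi rfl
          (by omega) hhin (Or.inl hcond) hinv
        exact ⟨this.1, this.2.1, this.2.2⟩
      · simp only [if_neg hcond]
        have hninv : ∀ k, (lo + hi + 1) / 2 - 1 < k → k ≤ cs.length → ¬ pvGood cs m k := by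
          intro k hk hkn hgk
          by_cases hk2 : hi < k
          · exact hinv k hk2 hkn hgk
          · exact hcond (pvGood_mono cs m _ k (by omega) hgk)
        have := ihd ((lo + hi + 1) / 2 - 1 - lo) (by omega) lo ((lo + hi + 1) / 2 - 1) rfl
          (by omega) (by omega) hgoodlo hninv
        exact ⟨this.1, this.2.1, le_trans this.2.2 (by omega)⟩
    · simp only [if_neg hlt]
      have heq : lo = hi := by omega
      subst heq
      exact ⟨hgoodlo, hinv, le_refl _⟩

-- the characterisation pins the answer uniquely
theorem answer_unique (cs : List Char) (m : Int) (i r : Nat)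
    (hi : i ≤ cs.length) (hr : r ≤ cs.length)
    (hgi : pvGood cs m i ∨ i = 0) (hvi : ∀ k, i < k → k ≤ cs.length → ¬ pvGood cs m k)
    (hgr : pvGood cs m r ∨ r = 0) (hvr : ∀ k, r < k → k ≤ cs.length → ¬ pvGood cs m k) :
    i = r := by
  rcases lt_trichotomy i r with h | h | h
  · exfalso
    have hngr := hvi r h hr
    rcases hgr with hg | h0
    · exact hngr hg
    · omega
  · exact h
  · exfalso
    have hngi := hvr i h hi
    rcases hgi with hg | h0
    · exact hngi hg
    · omega

-- A's answer index satisfies the characterisation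
theorem A_char (cs : List Char) (m : Int) (i : Nat)
    (hi : i = match firstOver m 0 none cs with
              | none => cs.length
              | some j => j) :
    i ≤ cs.length ∧ (pvGood cs m i ∨ i = 0) ∧
    (∀ k, i < k → k ≤ cs.length → ¬ pvGood cs m k) := by
  by_cases hm : 0 ≤ m
  · have hFO := FO_spec m cs 0 none hm
    cases hfo : firstOver m 0 none cs with
    | none =>
      rw [hfo] at hFO
      simp only [hfo] at hi
      subst hi
      refine ⟨le_refl _, Or.inl ?_, ?_⟩
      · unfold pvGood; rw [List.take_length]; omega
      · intro k hk hkn; omega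
    | some j =>
      rw [hfo] at hFO
      simp only [hfo] at hi
      subst hi
      obtain ⟨hjl, hle, hgt⟩ := hFO
      refine ⟨by omega, Or.inl (by unfold pvGood; omega), ?_⟩
      intro k hk hkn hgk
      have : pvGood cs m (i + 1) := pvGood_mono cs m (i + 1) k (by omega) hgk
      unfold pvGood at this
      push_cast at this
      omega
  · -- max_length < 0: no prefix fits; A stops before the first character (or text is empty)
    have hng : ∀ k, ¬ pvGood cs m k := by
      intro k hgk
      have := pvGood_mono cs m 0 k (by omega) hgk
      unfold pvGood at this
      simp [pcP] at this
      omega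
    cases cs with
    | nil =>
      simp [firstOver] at hi
      subst hi
      exact ⟨by simp, Or.inr rfl, fun k _ _ => hng k⟩
    | cons a t =>
      have hfo : firstOver m 0 none (a :: t) = some 0 := by
        simp only [firstOver]
        rw [if_pos (by simp; omega)]
      simp only [hfo] at hi
      subst hi
      exact ⟨by simp, Or.inr rfl, fun k _ _ => hng k⟩

-- ===== VERDICT (by name: the statement is the Claim_ definition above) =====
theorem truncate_label_spec : Claim_equal_truncate_label := by
  intro text max_length _
  unfold Spec_truncate_label truncate_label truncate_label_alt
  cases max_length with
  | none => rfl
  | some m =>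
    simp only
    rw [buildReps_eq]
    have hB := bsearch_spec text.toList m text.toList.length 0 text.toList.length
      (by omega) (by omega) (le_refl _) (Or.inr rfl) (by intro k hk hkn; omega)
    have hgoA := goA_eq m text.toList [] 0
    simp only [List.nil_append, List.length_nil, List.getLast?_nil] at hgoA
    rw [hgoA]
    set r := bsearchB (pvTable text.toList) m 0 text.toList.length with hrdef
    cases hfo : firstOver m 0 none text.toList with
    | none =>
      have hA := A_char text.toList m text.toList.length (by rw [hfo])
      have := answer_unique text.toList m text.toList.length r hA.1 (le_trans hB.2.2 (le_refl _))
        hA.2.1 hA.2.2 hB.1 hB.2.1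
      rw [← this, List.take_length, String.ofList_toList]
    | some j =>
      have hA := A_char text.toList m j (by rw [hfo])
      have := answer_unique text.toList m j r hA.1 (le_trans hB.2.2 (le_refl _))
        hA.2.1 hA.2.2 hB.1 hB.2.1
      simp only [Nat.zero_add, ← this]
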